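-- pv_equiv track=rewrite | github.com/BobrZol/fl-2024-Zabaryankiy-Alexander | RegexToNfa.py | outer_brackets
-- ===== SOURCE A (Python) =====
-- def outer_brackets(regex):
--     if len(regex) < 2:
--         return False
--     tmp = 0
--     ind = 0
--     for cr in regex:
--         if cr == "(":
--             tmp += 1
--         if cr == ")":
--             tmp -= 1
--         if tmp == 0 and ind < len(regex) - 1:
--             return False
--         ind += 1
--     return True
-- ===== SOURCE B (Python) =====
-- def outer_brackets(regex):
--     if len(regex) < 2:
--         return False
--     total = sum((c == "(") - (c == ")") for c in regex)
--     suf = 0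
--     for c in reversed(regex[1:]):
--         suf += (c == "(") - (c == ")")
--         if suf == total:
--             return False
--     return True
-- ===== Notes on version B (the rewrite author's own statement) =====
-- stated objective: alternative
-- what changed: B scans the string BACKWARDS: it computes the total bracket balance once, then walks the reversed tail accumulating suffix balances and fails when a suffix balance equals the total (a proper prefix has balance 0 iff its complementary suffix has balance equal to the total), instead of A's forward pass that tracks the running prefix depth with an index counter.
import Mathlib
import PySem

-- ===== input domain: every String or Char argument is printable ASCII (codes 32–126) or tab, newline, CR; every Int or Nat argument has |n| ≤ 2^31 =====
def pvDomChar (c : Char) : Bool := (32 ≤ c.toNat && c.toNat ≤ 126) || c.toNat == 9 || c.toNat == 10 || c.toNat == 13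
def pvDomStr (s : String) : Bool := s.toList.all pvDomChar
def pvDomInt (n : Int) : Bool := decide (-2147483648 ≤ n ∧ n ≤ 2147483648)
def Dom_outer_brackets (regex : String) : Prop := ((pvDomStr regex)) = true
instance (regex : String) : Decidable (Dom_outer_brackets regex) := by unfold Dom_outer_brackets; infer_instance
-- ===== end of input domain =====

-- B replaces A's forward depth scan by a backward one: one pass for the total balance,
-- then a right-to-left scan of suffix balances compared against the total; same cost,
-- different traversal direction and decomposition.

-- ===== PORT A =====
-- the for-loop of A with its early return: state (tmp, ind), total length n
def pvLoopA : List Char → Int → Nat → Nat → Bool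
  | [], _, _, _ => true
  | c :: cs, tmp, ind, n =>
    let tmp1 := if c = '(' then tmp + 1 else tmp
    let tmp2 := if c = ')' then tmp1 - 1 else tmp1
    if tmp2 = 0 ∧ ind < n - 1 then false
    else pvLoopA cs tmp2 (ind + 1) n

def outer_brackets (regex : String) : Bool :=
  if regex.toList.length < 2 then false
  else pvLoopA regex.toList 0 0 regex.toList.length

-- ===== PORT B =====
-- (c == "(") - (c == ")") as an Int, as Source B computes it
def pvDelta (c : Char) : Int :=
  (if c = '(' then (1 : Int) else 0) - (if c = ')' then (1 : Int) else 0)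

-- Source B's backward loop: suf += delta(c); if suf == total: return False
def pvLoopB : List Char → Int → Int → Bool
  | [], _, _ => true
  | c :: cs, suf, total =>
    if suf + pvDelta c = total then false
    else pvLoopB cs (suf + pvDelta c) total

def outer_brackets_alt (regex : String) : Bool :=
  if regex.toList.length < 2 then false
  else
    let total := (regex.toList.map pvDelta).sum          -- sum(... for c in regex)
    -- reversed(regex[1:])
    pvLoopB ((PySem.Str.slice regex (some 1) none).toList.reverse) 0 total

-- ===== PRECONDITION & SPEC =====
def Spec_outer_brackets (regex : String) (out : Bool) : Prop := out = outer_brackets_alt regex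
instance (regex : String) (out : Bool) : Decidable (Spec_outer_brackets regex out) := by unfold Spec_outer_brackets; infer_instance

-- ===== CLAIM (what is proved, stated in full; the proofs are below) =====
def Claim_equal_outer_brackets : Prop := ∀ (regex : String), Dom_outer_brackets regex → Spec_outer_brackets regex (outer_brackets regex)

-- ===== LEMMAS AND PROOFS =====

-- running depths starting from s (the prefix balances of l, offset by s)
def pvDepths (s : Int) : List Char → List Int
  | [] => []
  | c :: cs => (s + pvDelta c) :: pvDepths (s + pvDelta c) cs

theorem pvA_two_step (c : Char) (tmp : Int) :
    (if c = ')' then (if c = '(' then tmp + 1 else tmp) - 1 else (if c = '(' then tmp + 1 else tmp)) = tmp + pvDelta c := by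
  unfold pvDelta
  by_cases h1 : c = '('
  · subst h1; simp
  · simp only [h1, if_false]
    by_cases h2 : c = ')'
    · simp [h2]; omega
    · simp [h2]

theorem pvDepths_ne_nil (s : Int) (c : Char) (cs : List Char) :
    pvDepths s (c :: cs) ≠ [] := by simp [pvDepths]

-- A's loop returns false exactly when some depth other than the final one is 0
theorem pvLoopA_eq (cs : List Char) (tmp : Int) (ind n : Nat)
    (h : ind + cs.length = n) :
    pvLoopA cs tmp ind n = ! ((pvDepths tmp cs).dropLast.contains 0) := by
  induction cs generalizing tmp ind with
  | nil => simp [pvLoopA, pvDepths]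
  | cons c cs ih =>
    simp only [pvLoopA, pvDepths]
    rw [pvA_two_step]
    cases cs with
    | nil =>
      simp at h
      have hind : ¬ (ind < n - 1) := by omega
      simp [hind, pvLoopA, pvDepths]
    | cons d ds =>
      have hind : ind < n - 1 := by simp at h; omega
      rw [List.dropLast_cons_of_ne_nil (pvDepths_ne_nil _ d ds)]
      by_cases hz : tmp + pvDelta c = 0
      · simp [hz, hind]
      · rw [if_neg (by simp [hz])]
        rw [ih _ (ind + 1) (by simp at h ⊢; omega)]
        simp only [List.contains_cons]
        have hb : (0 == tmp + pvDelta c) = false := by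
          simp only [beq_eq_false_iff_ne]
          exact fun e => hz e.symm
        simp [hb]

-- B's loop returns false exactly when some running depth equals total
theorem pvLoopB_eq (l : List Char) (suf total : Int) :
    pvLoopB l suf total = ! ((pvDepths suf l).contains total) := by
  induction l generalizing suf with
  | nil => simp [pvLoopB, pvDepths]
  | cons c cs ih =>
    simp only [pvLoopB, pvDepths, List.contains_cons]
    by_cases hz : suf + pvDelta c = total
    · simp [hz]
    · have hb : (total == suf + pvDelta c) = false := by
        simp only [beq_eq_false_iff_ne]
        exact fun e => hz e.symm
      simp [hz, hb, ih]

-- membership in the depth list = some nonempty prefix has that balance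
theorem pvMem_pvDepths (l : List Char) (s x : Int) :
    x ∈ pvDepths s l ↔ ∃ a b, l = a ++ b ∧ a ≠ [] ∧ x = s + (a.map pvDelta).sum := by
  induction l generalizing s with
  | nil =>
    simp only [pvDepths, List.not_mem_nil, false_iff]
    rintro ⟨a, b, hab, ha, -⟩
    rcases List.append_eq_nil_iff.mp hab.symm with ⟨h1, -⟩
    exact ha h1
  | cons c cs ih =>
    simp only [pvDepths, List.mem_cons, ih]
    constructor
    · rintro (rfl | ⟨a, b, rfl, ha, rfl⟩)
      · exact ⟨[c], cs, rfl, by simp, by simp⟩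
      · exact ⟨c :: a, b, rfl, by simp, by simp; ring⟩
    · rintro ⟨a, b, hab, ha, rfl⟩
      cases a with
      | nil => exact absurd rfl ha
      | cons a0 as =>
        rcases List.cons_eq_cons.mp hab with ⟨rfl, rfl⟩
        cases as with
        | nil => left; simp
        | cons a1 as' =>
          right
          exact ⟨a1 :: as', b, rfl, by simp, by simp; ring⟩

theorem pvDepths_dropLast (l : List Char) (s : Int) :
    (pvDepths s l).dropLast = pvDepths s l.dropLast := by
  induction l generalizing s with
  | nil => simp [pvDepths]
  | cons c cs ih =>
    cases cs with
    | nil => simp [pvDepths]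
    | cons d ds =>
      have h1 : pvDepths s (c :: d :: ds) = (s + pvDelta c) :: pvDepths (s + pvDelta c) (d :: ds) := rfl
      have h2 : (c :: d :: ds).dropLast = c :: (d :: ds).dropLast := rfl
      rw [h1, h2, List.dropLast_cons_of_ne_nil (pvDepths_ne_nil _ d ds), ih]
      rfl

-- the pivot: a proper nonempty prefix balances to 0 iff a suffix of the tail balances to the total
theorem pvKey (cs : List Char) :
    (0 : Int) ∈ pvDepths 0 cs.dropLast ↔ ((cs.map pvDelta).sum) ∈ pvDepths 0 (cs.drop 1).reverse := by
  rw [pvMem_pvDepths, pvMem_pvDepths]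
  constructor
  · rintro ⟨a, b, hab, ha, hbal⟩
    have hcsne : cs ≠ [] := by
      rintro rfl
      simp at hab
      exact ha hab.1
    obtain ⟨x, hx⟩ : ∃ x, cs.getLast hcsne = x := ⟨_, rfl⟩
    -- cs = a ++ r where r := b ++ [x] (x the last char) is the complementary nonempty suffix
    have hcs : cs = a ++ (b ++ [x]) := by
      conv_lhs => rw [← List.dropLast_append_getLast hcsne]
      rw [hab, hx, List.append_assoc]
    cases a with
    | nil => exact absurd rfl ha
    | cons a0 as =>
      refine ⟨(b ++ [x]).reverse, as.reverse, ?_, by simp, ?_⟩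
      · rw [hcs]; simp
      · have h1 : (((b ++ [x]).reverse).map pvDelta).sum
            = ((b ++ [x]).map pvDelta).sum := by
          rw [List.map_reverse, List.sum_reverse]
        have h2 : (cs.map pvDelta).sum
            = ((a0 :: as).map pvDelta).sum + ((b ++ [x]).map pvDelta).sum := by
          conv_lhs => rw [hcs]
          rw [List.map_append, List.sum_append]
        rw [h1, h2]
        simp only [List.map_cons, List.sum_cons] at hbal ⊢
        linarith
  · rintro ⟨a, b, hab, ha, hbal⟩
    cases cs with
    | nil =>
      simp at hab
      exact absurd hab.1 ha
    | cons c0 ct =>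
      -- ct.reverse = a ++ b, so ct = b.reverse ++ a.reverse with a.reverse nonempty
      have hct : ct = b.reverse ++ a.reverse := by
        have := congrArg List.reverse hab
        simpa using this
      have harev : a.reverse ≠ [] := by simpa using ha
      refine ⟨c0 :: b.reverse, a.reverse.dropLast, ?_, by simp, ?_⟩
      · rw [List.dropLast_cons_of_ne_nil (by rw [hct]; exact fun e => harev (List.append_eq_nil_iff.mp e).2),
          hct, List.dropLast_append_of_ne_nil harev, List.cons_append]
      · have h1 : ((a.reverse).map pvDelta).sum = (a.map pvDelta).sum := by
          rw [List.map_reverse, List.sum_reverse]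
        have h2 : ((c0 :: ct).map pvDelta).sum
            = pvDelta c0 + (((b.reverse).map pvDelta).sum + ((a.reverse).map pvDelta).sum) := by
          rw [hct]
          simp [List.map_append, List.sum_append]
        rw [h2, h1] at hbal
        simp only [List.map_cons, List.sum_cons]
        linarith

-- ===== VERDICT (by name: the statement is the Claim_ definition above) =====
theorem outer_brackets_spec : Claim_equal_outer_brackets := by
  intro regex _
  unfold Spec_outer_brackets outer_brackets outer_brackets_alt
  by_cases h : regex.toList.length < 2
  · rw [if_pos h, if_pos h]
  · rw [if_neg h, if_neg h]
    have hsl : (PySem.Str.slice regex (some 1) none).toList = regex.toList.drop 1 := by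
      rw [PySem.Str.toList_slice, PySem.Chars.slice_eq_listSlice,
        PySem.List.slice_from regex.toList (by norm_num : (0:Int) ≤ 1)]
      rfl
    rw [hsl]
    rw [pvLoopA_eq regex.toList 0 0 regex.toList.length (by simp)]
    rw [pvLoopB_eq]
    rw [pvDepths_dropLast]
    congr 1
    rw [Bool.eq_iff_iff]
    simp only [List.contains_iff_mem]
    exact pvKey regex.toList
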